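-- pv_equiv track=rewrite | github.com/ArnavChawla/Codejam | Africa 2010 t9/t9.py | find
-- ===== SOURCE A (Python) =====
-- chars = ["abc","def",
--         "ghi","jkl","mno",
--         "pqrs","tuv","wxyz"]
--
-- def find(message):
--     toReturn = ""
--     previous = 1
--     for char in message:
--         found = False
--         i = 2
--         if(char != " "):
--             for segment in chars:
--                 x = 1
--                 for letter in segment:
--                     if(letter == char):
--                         if(found == False):
--                             if(previous==i):
--                                 toReturn += " "
--                         previous = i
--                         found == True
--                         for y in range(x):
--                             toReturn += str(i)
--                     else:
--                         x+=1
--                 i+=1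
--         else:
--             if(previous==0):
--                 toReturn += " 0"
--             else:
--                 toReturn +="0"
--             previous = 0
--     return toReturn
-- ===== SOURCE B (Python) =====
-- chars = ["abc","def",
--         "ghi","jkl","mno",
--         "pqrs","tuv","wxyz"]
--
-- def find(message):
--     # pass 1: build the keypad table once: letter -> (digit, presses string)
--     keypad = {}
--     for d, seg in enumerate(chars, start=2):
--         for pos, letter in enumerate(seg, start=1):
--             keypad[letter] = (d, str(d) * pos)
--     keypad[' '] = (0, '0')
--     pairs = [keypad[c] for c in message if c in keypad]
--     # pass 2: insert a pause when two consecutive codes share a digit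
--     out = []
--     prev = 1
--     for d, code in pairs:
--         if d == prev:
--             out.append(' ')
--         out.append(code)
--         prev = d
--     return ''.join(out)
-- ===== Notes on version B (the rewrite author's own statement) =====
-- stated objective: faster
-- what changed: B precomputes a letter->(digit,code) table once and then does a single linear pass inserting a pause when consecutive codes share a digit, instead of A's per-character nested scan over all keypad segments.
import Mathlib
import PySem

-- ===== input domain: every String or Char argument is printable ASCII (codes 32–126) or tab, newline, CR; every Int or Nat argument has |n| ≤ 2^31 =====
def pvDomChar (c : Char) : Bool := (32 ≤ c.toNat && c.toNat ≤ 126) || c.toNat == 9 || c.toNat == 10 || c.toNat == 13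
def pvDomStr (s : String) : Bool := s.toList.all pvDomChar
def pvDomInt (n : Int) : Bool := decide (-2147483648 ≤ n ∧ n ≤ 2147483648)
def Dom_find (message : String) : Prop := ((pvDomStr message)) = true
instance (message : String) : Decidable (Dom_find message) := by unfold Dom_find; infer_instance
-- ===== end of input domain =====

-- B builds the keypad table once and then makes one linear pass; A rescans every keypad segment per character.

-- the module-level constant `chars` both Pythons use
def pvChars : List String := ["abc","def",
        "ghi","jkl","mno",
        "pqrs","tuv","wxyz"]

-- ===== PORT A =====
-- inner `for letter in segment` loop; state (toReturn, previous, found, x)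
def stepLetter (char : Char) (i : Int) (st : List Char × Int × Bool × Int) (letter : Char) : List Char × Int × Bool × Int :=
  let (toReturn, previous, found, x) := st
  if letter == char then
    let toReturn := if found == false then (if previous == i then toReturn ++ [' '] else toReturn) else toReturn
    -- Python's `found == True` is a bare comparison: no state change
    let toReturn := (PySem.List.pyRange 0 x 1).foldl (fun s _ => s ++ PySem.Int.toChars i) toReturn
    (toReturn, i, found, x)
  else (toReturn, previous, found, x + 1)

-- `for segment in chars` loop; state (toReturn, previous, found, i)
def stepSegment (char : Char) (st : List Char × Int × Bool × Int) (segment : String) : List Char × Int × Bool × Int :=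
  let (toReturn, previous, found, i) := st
  let r := segment.toList.foldl (stepLetter char i) (toReturn, previous, found, 1)
  (r.1, r.2.1, r.2.2.1, i + 1)

-- `for char in message` body; state (toReturn, previous)
def stepChar (st : List Char × Int) (char : Char) : List Char × Int :=
  if char != ' ' then
    let r := pvChars.foldl (stepSegment char) (st.1, st.2, false, 2)
    (r.1, r.2.1)
  else
    if st.2 == 0 then (st.1 ++ [' ', '0'], 0) else (st.1 ++ ['0'], 0)

def find (message : String) : String :=
  String.ofList (message.toList.foldl stepChar ([], 1)).1

-- ===== PORT B =====
-- hand port of Python string repetition `s * n` (n copies, empty for n ≤ 0): exact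
def pyStrMul (cs : List Char) (n : Int) : List Char :=
  (List.replicate n.toNat cs).flatten

-- keypad = {letter: (digit, str(digit)*pos)}, then keypad[' '] = (0, '0')
def keypad : PySem.Dict Char (Int × List Char) :=
  let d0 := (PySem.List.enumerate pvChars 2).foldl
    (fun (dct : PySem.Dict Char (Int × List Char)) p =>
      (PySem.List.enumerate p.2.toList 1).foldl
        (fun dct q => dct.insert q.2 (p.1, pyStrMul (PySem.Int.toChars p.1) q.1)) dct)
    PySem.Dict.empty
  d0.insert ' ' (0, ['0'])

-- `for d, code in pairs` body; state (out, prev)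
def altStep (st : List (List Char) × Int) (dw : Int × List Char) : List (List Char) × Int :=
  let out := if dw.1 == st.2 then st.1 ++ [[' ']] else st.1
  (out ++ [dw.2], dw.1)

def find_alt (message : String) : String :=
  let pairs := message.toList.filterMap (fun c => keypad.get? c)
  String.ofList (PySem.Chars.join [] (pairs.foldl altStep ([], 1)).1)

-- ===== PRECONDITION & SPEC =====
def Spec_find (message : String) (out : String) : Prop := out = find_alt message
instance (message : String) (out : String) : Decidable (Spec_find message out) := by unfold Spec_find; infer_instance

-- ===== CLAIM (what is proved, stated in full; the proofs are below) =====
def Claim_equal_find : Prop := ∀ (message : String), Dom_find message → Spec_find message (find message)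

-- ===== LEMMAS AND PROOFS =====

-- what one character contributes, and the next `previous`, read off the keypad table
def emit (c : Char) (p : Int) : List Char :=
  match keypad.get? c with
  | none => []
  | some (d, w) => (if p == d then [' '] else []) ++ w

def nextP (c : Char) (p : Int) : Int :=
  match keypad.get? c with
  | none => p
  | some (d, _) => d

def canon : List Char → Int → List Char
  | [], _ => []
  | c :: cs, p => emit c p ++ canon cs (nextP c p)

theorem stepChar_eq (c : Char) (s : List Char) (p : Int) :
    stepChar (s, p) c = (s ++ emit c p, nextP c p) := by
  by_cases hc : c ∈ ([' ', 'a', 'b', 'c', 'd', 'e', 'f', 'g', 'h', 'i', 'j', 'k', 'l', 'm', 'n', 'o', 'p', 'q', 'r', 's', 't', 'u', 'v', 'w', 'x', 'y', 'z'] : List Char)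
  · fin_cases hc
    · rw [emit, nextP, show keypad.get? ' ' = some (0, ['0']) from by decide]
      simp [stepChar]
      by_cases hp : p = 0 <;> simp [hp]
    · rw [emit, nextP, show keypad.get? 'a' = some (2, ['2']) from by decide]
      simp [stepChar, stepSegment, stepLetter, pvChars, PySem.List.pyRange, PySem.Int.toChars,
        List.range_succ, Nat.toDigits, Nat.toDigitsCore]
      by_cases hp : p = 2 <;> simp [hp] <;> decide
    · rw [emit, nextP, show keypad.get? 'b' = some (2, ['2','2']) from by decide]
      simp [stepChar, stepSegment, stepLetter, pvChars, PySem.List.pyRange, PySem.Int.toChars,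
        List.range_succ, Nat.toDigits, Nat.toDigitsCore]
      by_cases hp : p = 2 <;> simp [hp] <;> decide
    · rw [emit, nextP, show keypad.get? 'c' = some (2, ['2','2','2']) from by decide]
      simp [stepChar, stepSegment, stepLetter, pvChars, PySem.List.pyRange, PySem.Int.toChars,
        List.range_succ, Nat.toDigits, Nat.toDigitsCore]
      by_cases hp : p = 2 <;> simp [hp] <;> decide
    · rw [emit, nextP, show keypad.get? 'd' = some (3, ['3']) from by decide]
      simp [stepChar, stepSegment, stepLetter, pvChars, PySem.List.pyRange, PySem.Int.toChars,
        List.range_succ, Nat.toDigits, Nat.toDigitsCore]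
      by_cases hp : p = 3 <;> simp [hp] <;> decide
    · rw [emit, nextP, show keypad.get? 'e' = some (3, ['3','3']) from by decide]
      simp [stepChar, stepSegment, stepLetter, pvChars, PySem.List.pyRange, PySem.Int.toChars,
        List.range_succ, Nat.toDigits, Nat.toDigitsCore]
      by_cases hp : p = 3 <;> simp [hp] <;> decide
    · rw [emit, nextP, show keypad.get? 'f' = some (3, ['3','3','3']) from by decide]
      simp [stepChar, stepSegment, stepLetter, pvChars, PySem.List.pyRange, PySem.Int.toChars,
        List.range_succ, Nat.toDigits, Nat.toDigitsCore]
      by_cases hp : p = 3 <;> simp [hp] <;> decide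
    · rw [emit, nextP, show keypad.get? 'g' = some (4, ['4']) from by decide]
      simp [stepChar, stepSegment, stepLetter, pvChars, PySem.List.pyRange, PySem.Int.toChars,
        List.range_succ, Nat.toDigits, Nat.toDigitsCore]
      by_cases hp : p = 4 <;> simp [hp] <;> decide
    · rw [emit, nextP, show keypad.get? 'h' = some (4, ['4','4']) from by decide]
      simp [stepChar, stepSegment, stepLetter, pvChars, PySem.List.pyRange, PySem.Int.toChars,
        List.range_succ, Nat.toDigits, Nat.toDigitsCore]
      by_cases hp : p = 4 <;> simp [hp] <;> decide
    · rw [emit, nextP, show keypad.get? 'i' = some (4, ['4','4','4']) from by decide]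
      simp [stepChar, stepSegment, stepLetter, pvChars, PySem.List.pyRange, PySem.Int.toChars,
        List.range_succ, Nat.toDigits, Nat.toDigitsCore]
      by_cases hp : p = 4 <;> simp [hp] <;> decide
    · rw [emit, nextP, show keypad.get? 'j' = some (5, ['5']) from by decide]
      simp [stepChar, stepSegment, stepLetter, pvChars, PySem.List.pyRange, PySem.Int.toChars,
        List.range_succ, Nat.toDigits, Nat.toDigitsCore]
      by_cases hp : p = 5 <;> simp [hp] <;> decide
    · rw [emit, nextP, show keypad.get? 'k' = some (5, ['5','5']) from by decide]
      simp [stepChar, stepSegment, stepLetter, pvChars, PySem.List.pyRange, PySem.Int.toChars,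
        List.range_succ, Nat.toDigits, Nat.toDigitsCore]
      by_cases hp : p = 5 <;> simp [hp] <;> decide
    · rw [emit, nextP, show keypad.get? 'l' = some (5, ['5','5','5']) from by decide]
      simp [stepChar, stepSegment, stepLetter, pvChars, PySem.List.pyRange, PySem.Int.toChars,
        List.range_succ, Nat.toDigits, Nat.toDigitsCore]
      by_cases hp : p = 5 <;> simp [hp] <;> decide
    · rw [emit, nextP, show keypad.get? 'm' = some (6, ['6']) from by decide]
      simp [stepChar, stepSegment, stepLetter, pvChars, PySem.List.pyRange, PySem.Int.toChars,
        List.range_succ, Nat.toDigits, Nat.toDigitsCore]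
      by_cases hp : p = 6 <;> simp [hp] <;> decide
    · rw [emit, nextP, show keypad.get? 'n' = some (6, ['6','6']) from by decide]
      simp [stepChar, stepSegment, stepLetter, pvChars, PySem.List.pyRange, PySem.Int.toChars,
        List.range_succ, Nat.toDigits, Nat.toDigitsCore]
      by_cases hp : p = 6 <;> simp [hp] <;> decide
    · rw [emit, nextP, show keypad.get? 'o' = some (6, ['6','6','6']) from by decide]
      simp [stepChar, stepSegment, stepLetter, pvChars, PySem.List.pyRange, PySem.Int.toChars,
        List.range_succ, Nat.toDigits, Nat.toDigitsCore]
      by_cases hp : p = 6 <;> simp [hp] <;> decide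
    · rw [emit, nextP, show keypad.get? 'p' = some (7, ['7']) from by decide]
      simp [stepChar, stepSegment, stepLetter, pvChars, PySem.List.pyRange, PySem.Int.toChars,
        List.range_succ, Nat.toDigits, Nat.toDigitsCore]
      by_cases hp : p = 7 <;> simp [hp] <;> decide
    · rw [emit, nextP, show keypad.get? 'q' = some (7, ['7','7']) from by decide]
      simp [stepChar, stepSegment, stepLetter, pvChars, PySem.List.pyRange, PySem.Int.toChars,
        List.range_succ, Nat.toDigits, Nat.toDigitsCore]
      by_cases hp : p = 7 <;> simp [hp] <;> decide
    · rw [emit, nextP, show keypad.get? 'r' = some (7, ['7','7','7']) from by decide]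
      simp [stepChar, stepSegment, stepLetter, pvChars, PySem.List.pyRange, PySem.Int.toChars,
        List.range_succ, Nat.toDigits, Nat.toDigitsCore]
      by_cases hp : p = 7 <;> simp [hp] <;> decide
    · rw [emit, nextP, show keypad.get? 's' = some (7, ['7','7','7','7']) from by decide]
      simp [stepChar, stepSegment, stepLetter, pvChars, PySem.List.pyRange, PySem.Int.toChars,
        List.range_succ, Nat.toDigits, Nat.toDigitsCore]
      by_cases hp : p = 7 <;> simp [hp] <;> decide
    · rw [emit, nextP, show keypad.get? 't' = some (8, ['8']) from by decide]
      simp [stepChar, stepSegment, stepLetter, pvChars, PySem.List.pyRange, PySem.Int.toChars,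
        List.range_succ, Nat.toDigits, Nat.toDigitsCore]
      by_cases hp : p = 8 <;> simp [hp] <;> decide
    · rw [emit, nextP, show keypad.get? 'u' = some (8, ['8','8']) from by decide]
      simp [stepChar, stepSegment, stepLetter, pvChars, PySem.List.pyRange, PySem.Int.toChars,
        List.range_succ, Nat.toDigits, Nat.toDigitsCore]
      by_cases hp : p = 8 <;> simp [hp] <;> decide
    · rw [emit, nextP, show keypad.get? 'v' = some (8, ['8','8','8']) from by decide]
      simp [stepChar, stepSegment, stepLetter, pvChars, PySem.List.pyRange, PySem.Int.toChars,
        List.range_succ, Nat.toDigits, Nat.toDigitsCore]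
      by_cases hp : p = 8 <;> simp [hp] <;> decide
    · rw [emit, nextP, show keypad.get? 'w' = some (9, ['9']) from by decide]
      simp [stepChar, stepSegment, stepLetter, pvChars, PySem.List.pyRange, PySem.Int.toChars,
        List.range_succ, Nat.toDigits, Nat.toDigitsCore]
      by_cases hp : p = 9 <;> simp [hp] <;> decide
    · rw [emit, nextP, show keypad.get? 'x' = some (9, ['9','9']) from by decide]
      simp [stepChar, stepSegment, stepLetter, pvChars, PySem.List.pyRange, PySem.Int.toChars,
        List.range_succ, Nat.toDigits, Nat.toDigitsCore]
      by_cases hp : p = 9 <;> simp [hp] <;> decide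
    · rw [emit, nextP, show keypad.get? 'y' = some (9, ['9','9','9']) from by decide]
      simp [stepChar, stepSegment, stepLetter, pvChars, PySem.List.pyRange, PySem.Int.toChars,
        List.range_succ, Nat.toDigits, Nat.toDigitsCore]
      by_cases hp : p = 9 <;> simp [hp] <;> decide
    · rw [emit, nextP, show keypad.get? 'z' = some (9, ['9','9','9','9']) from by decide]
      simp [stepChar, stepSegment, stepLetter, pvChars, PySem.List.pyRange, PySem.Int.toChars,
        List.range_succ, Nat.toDigits, Nat.toDigitsCore]
      by_cases hp : p = 9 <;> simp [hp] <;> decide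
  · simp at hc
    obtain ⟨h0, h1, h2, h3, h4, h5, h6, h7, h8, h9, h10, h11, h12, h13, h14, h15, h16, h17, h18, h19, h20, h21, h22, h23, h24, h25, h26⟩ := hc
    rw [emit, nextP, show keypad.get? c = none from by
      rw [PySem.Dict.get?_eq_none_iff_not_mem_keys, show keypad.keys = ['a', 'b', 'c', 'd', 'e', 'f', 'g', 'h', 'i', 'j', 'k', 'l', 'm', 'n', 'o', 'p', 'q', 'r', 's', 't', 'u', 'v', 'w', 'x', 'y', 'z', ' '] from by decide]
      simp [h0, h1, h2, h3, h4, h5, h6, h7, h8, h9, h10, h11, h12, h13, h14, h15, h16, h17, h18, h19, h20, h21, h22, h23, h24, h25, h26]]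
    simp [stepChar, stepSegment, stepLetter, pvChars, bne, beq_iff_eq, h0, Ne.symm h1, Ne.symm h2, Ne.symm h3, Ne.symm h4, Ne.symm h5, Ne.symm h6, Ne.symm h7, Ne.symm h8, Ne.symm h9, Ne.symm h10, Ne.symm h11, Ne.symm h12, Ne.symm h13, Ne.symm h14, Ne.symm h15, Ne.symm h16, Ne.symm h17, Ne.symm h18, Ne.symm h19, Ne.symm h20, Ne.symm h21, Ne.symm h22, Ne.symm h23, Ne.symm h24, Ne.symm h25, Ne.symm h26]

theorem foldA (l : List Char) (s : List Char) (p : Int) :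
    (l.foldl stepChar (s, p)).1 = s ++ canon l p := by
  induction l generalizing s p with
  | nil => simp [canon]
  | cons c cs ih => simp [canon, stepChar_eq, ih, List.append_assoc]

theorem join_nil_eq_flatten (l : List (List Char)) :
    PySem.Chars.join [] l = l.flatten := by
  show List.intercalate [] l = l.flatten
  induction l with
  | nil => rfl
  | cons a t ih =>
    cases t with
    | nil => simp [List.intercalate]
    | cons b u =>
      simp only [List.intercalate, List.intersperse] at *
      simp [ih]

theorem foldB (l : List Char) (acc : List (List Char)) (p : Int) :
    ((l.filterMap (fun c => keypad.get? c)).foldl altStep (acc, p)).1.flatten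
      = acc.flatten ++ canon l p := by
  induction l generalizing acc p with
  | nil => simp [canon]
  | cons c cs ih =>
    rcases h : keypad.get? c with _ | ⟨d, w⟩
    · simp [h, ih, canon, emit, nextP]
    · simp only [List.filterMap_cons, h, List.foldl_cons]
      rw [show altStep (acc, p) (d, w)
            = (acc ++ ((if p == d then [[' ']] else []) ++ [w]), d) from by
          simp only [altStep]
          by_cases hdp : d = p <;> simp [hdp, Ne.symm, beq_iff_eq]]
      rw [ih]
      simp only [canon, emit, nextP, h, List.flatten_append, List.append_assoc]
      by_cases hdp : p = d <;> simp [hdp]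

-- ===== VERDICT (by name: the statement is the Claim_ definition above) =====
theorem find_spec : Claim_equal_find := by
  intro message _
  simp only [Spec_find, find, find_alt, foldA, join_nil_eq_flatten, foldB,
    List.flatten_nil, List.nil_append]
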